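-- pv_equiv track=rewrite | github.com/nateshv54/DSA | Arrays/Array Manipulations/Print the array after K operations.py | printArrayAfterKOperations
-- ===== SOURCE A (Python) =====
-- def printArrayAfterKOperations(arr, N, K):
--     if K == 0:
--         return arr
--
--     soln = list()
--
--     # Finding maximum element of the array.
--     maxm = max(arr)
--     # Finding minimum element of the array.
--     minm = min(arr)
--
--     # If K is odd, then all array will be transformed to maxm - Arr[i].
--     if K & 1:
--         for i in range(N):
--             soln.append(maxm - arr[i])
--
--     # Else if K is even, then all array will be transformed to minm - Arr[i].
--     else:
--         for i in range(N):
--             soln.append(arr[i] - minm)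
--
--     return soln
-- ===== SOURCE B (Python) =====
-- def printArrayAfterKOperations(arr, N, K):
--     if K == 0:
--         return arr
--     # The transformation has period 2 once applied, so only K's parity matters:
--     # simulate 1 step if K is odd, 2 steps if K is even.
--     steps = 1 if K % 2 else 2
--     a = list(arr)
--     for _ in range(steps):
--         m = max(a)
--         a = [m - x for x in a]
--     return [a[i] for i in range(N)]
-- ===== Notes on version B (the rewrite author's own statement) =====
-- stated objective: alternative
-- what changed: B actually simulates the max-subtraction operation (recomputing max each round) for a parity-reduced number of steps, instead of A's precomputed max/min closed form with two separate branches.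
-- outside the precondition, e.g. on printArrayAfterKOperations([], 1, 1): A raises ValueError, B raises ValueError; on printArrayAfterKOperations([1, 2], 3, 1): A raises IndexError, B raises IndexError
import Mathlib
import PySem

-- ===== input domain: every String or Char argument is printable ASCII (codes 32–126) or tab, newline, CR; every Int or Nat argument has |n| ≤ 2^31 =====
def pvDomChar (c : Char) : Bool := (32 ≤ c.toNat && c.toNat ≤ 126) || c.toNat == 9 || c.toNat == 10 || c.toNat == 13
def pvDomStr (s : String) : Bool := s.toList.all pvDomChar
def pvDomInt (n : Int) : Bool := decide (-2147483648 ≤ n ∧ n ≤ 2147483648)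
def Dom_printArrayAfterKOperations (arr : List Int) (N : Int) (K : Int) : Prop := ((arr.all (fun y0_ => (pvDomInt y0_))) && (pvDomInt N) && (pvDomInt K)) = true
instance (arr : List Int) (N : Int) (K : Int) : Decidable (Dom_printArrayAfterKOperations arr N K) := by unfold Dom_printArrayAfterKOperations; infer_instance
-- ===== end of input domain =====

-- B replaces A's max/min parity closed form by a direct parity-reduced simulation of the operation (alternative decomposition, same results).

-- ===== PORT A =====
-- literal transliteration of A; max(arr)/min(arr) raise on empty arr and arr[i] raises
-- for N > len(arr) — those inputs are excluded by Pre_, so .getD 0 is never the value used.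
def printArrayAfterKOperations (arr : List Int) (N : Int) (K : Int) : List Int :=
  if K = 0 then arr
  else
    let maxm := (PySem.List.max? arr (fun x => x)).getD 0
    let minm := (PySem.List.min? arr (fun x => x)).getD 0
    if PySem.Int.band K 1 ≠ 0 then
      (PySem.List.pyRange 0 N 1).foldl
        (fun soln i => soln ++ [maxm - (PySem.List.pyGet? arr i).getD 0]) []
    else
      (PySem.List.pyRange 0 N 1).foldl
        (fun soln i => soln ++ [(PySem.List.pyGet? arr i).getD 0 - minm]) []

-- ===== PORT B =====
-- one round of B's loop: m = max(a); a = [m - x for x in a]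
-- (max of an empty list raises in Python; those inputs are excluded by Pre_)
def pvStep (a : List Int) : List Int :=
  let m := (PySem.List.max? a (fun x => x)).getD 0
  a.map (fun x => m - x)

def printArrayAfterKOperations_alt (arr : List Int) (N : Int) (K : Int) : List Int :=
  if K = 0 then arr
  else
    let steps : Nat := if PySem.Int.mod K 2 ≠ 0 then 1 else 2
    let a := (List.range steps).foldl (fun a _ => pvStep a) arr
    (PySem.List.pyRange 0 N 1).map (fun i => (PySem.List.pyGet? a i).getD 0)

-- ===== PRECONDITION & SPEC =====
-- Pre_ excludes exactly the inputs where A raises: K ≠ 0 with an empty arr (max()/min() of an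
-- empty sequence, ValueError) or with N > len(arr) (IndexError in the loop); B raises there too.
def Pre_printArrayAfterKOperations (arr : List Int) (N : Int) (K : Int) : Prop :=
  K = 0 ∨ (arr ≠ [] ∧ N ≤ arr.length)
instance (arr : List Int) (N : Int) (K : Int) : Decidable (Pre_printArrayAfterKOperations arr N K) := by unfold Pre_printArrayAfterKOperations; infer_instance
def pvWitness_printArrayAfterKOperations : List Int × Int × Int := ([1, 5, 2], 3, 2)

def Spec_printArrayAfterKOperations (arr : List Int) (N : Int) (K : Int) (out : List Int) : Prop := out = printArrayAfterKOperations_alt arr N K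
instance (arr : List Int) (N : Int) (K : Int) (out : List Int) : Decidable (Spec_printArrayAfterKOperations arr N K out) := by unfold Spec_printArrayAfterKOperations; infer_instance

-- ===== CLAIM (what is proved, stated in full; the proofs are below) =====
def Claim_equal_printArrayAfterKOperations : Prop := ∀ (arr : List Int) (N : Int) (K : Int), Dom_printArrayAfterKOperations arr N K → Pre_printArrayAfterKOperations arr N K → Spec_printArrayAfterKOperations arr N K (printArrayAfterKOperations arr N K)

-- ===== LEMMAS AND PROOFS =====

-- value-level characterisation of max? with key = id (the value of the max is unique)
lemma max?_id_eq_some (arr : List Int) (c : Int) (hc : c ∈ arr) (hub : ∀ y ∈ arr, y ≤ c) :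
    PySem.List.max? arr (fun x => x) = some c := by
  have hne : arr ≠ [] := by rintro rfl; simp at hc
  obtain ⟨v, hv⟩ : ∃ v, PySem.List.max? arr (fun x => x) = some v := by
    cases h : PySem.List.max? arr (fun x => x) with
    | none => exact absurd ((PySem.List.max?_eq_none_iff _ _).1 h) hne
    | some v => exact ⟨v, rfl⟩
  have hvm := PySem.List.max?_mem hv
  have hvmax := PySem.List.max?_isMax hv
  have : v = c := le_antisymm (hub v hvm) (hvmax c hc)
  rw [hv, this]

-- abbreviations used only in the proofs
def pvMax (arr : List Int) : Int := (PySem.List.max? arr (fun x => x)).getD 0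
def pvMin (arr : List Int) : Int := (PySem.List.min? arr (fun x => x)).getD 0

lemma max?_of_ne_nil (arr : List Int) (h : arr ≠ []) :
    PySem.List.max? arr (fun x => x) = some (pvMax arr) := by
  cases hm : PySem.List.max? arr (fun x => x) with
  | none => exact absurd ((PySem.List.max?_eq_none_iff _ _).1 hm) h
  | some v => simp [pvMax, hm]

lemma min?_of_ne_nil (arr : List Int) (h : arr ≠ []) :
    PySem.List.min? arr (fun x => x) = some (pvMin arr) := by
  cases hm : PySem.List.min? arr (fun x => x) with
  | none => exact absurd ((PySem.List.min?_eq_none_iff _ _).1 hm) h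
  | some v => simp [pvMin, hm]

lemma pvMin_mem (arr : List Int) (h : arr ≠ []) : pvMin arr ∈ arr :=
  PySem.List.min?_mem (min?_of_ne_nil arr h)

lemma pvMin_isMin (arr : List Int) (h : arr ≠ []) : ∀ y ∈ arr, pvMin arr ≤ y :=
  PySem.List.min?_isMin (min?_of_ne_nil arr h)

lemma pvStep_eq (arr : List Int) : pvStep arr = arr.map (fun x => pvMax arr - x) := rfl

-- max of the once-transformed array
lemma max?_pvStep (arr : List Int) (h : arr ≠ []) :
    PySem.List.max? (pvStep arr) (fun x => x) = some (pvMax arr - pvMin arr) := by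
  apply max?_id_eq_some
  · rw [pvStep_eq]
    exact List.mem_map.2 ⟨pvMin arr, pvMin_mem arr h, rfl⟩
  · intro y hy
    rw [pvStep_eq] at hy
    obtain ⟨x, hx, rfl⟩ := List.mem_map.1 hy
    have := pvMin_isMin arr h x hx
    omega

-- two operations give the "x - min" form
lemma pvStep_pvStep (arr : List Int) (h : arr ≠ []) :
    pvStep (pvStep arr) = arr.map (fun x => x - pvMin arr) := by
  rw [pvStep_eq (pvStep arr)]
  have : pvMax (pvStep arr) = pvMax arr - pvMin arr := by
    simp [pvMax, max?_pvStep arr h]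
  rw [this, pvStep_eq, List.map_map]
  apply List.map_congr_left
  intro x _
  simp

-- the foldl-append loop of A is a map
lemma foldl_append_map (f : Int → Int) (l : List Int) (s : List Int) :
    l.foldl (fun soln i => soln ++ [f i]) s = s ++ l.map f := by
  induction l generalizing s with
  | nil => simp
  | cons x t ih => simp [List.foldl_cons, ih]

-- indexing the mapped array inside range(N), N ≤ len
lemma pyGet_map_in_range (arr : List Int) (g : Int → Int) (N i : Int)
    (hi : i ∈ PySem.List.pyRange 0 N 1) (hN : N ≤ arr.length) :
    (PySem.List.pyGet? (arr.map g) i).getD 0 = g ((PySem.List.pyGet? arr i).getD 0) := by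
  have hmem := (PySem.List.mem_pyRange_one).1 hi
  have h0 : 0 ≤ i := hmem.1
  have hlt : i.toNat < arr.length := by omega
  rw [PySem.List.pyGet?_of_nonneg (h := h0), PySem.List.pyGet?_of_nonneg (h := h0)]
  simp [List.getElem?_map, List.getElem?_eq_getElem hlt]

-- ===== VERDICT (by name: the statement is the Claim_ definition above) =====
theorem printArrayAfterKOperations_spec : Claim_equal_printArrayAfterKOperations := by
  intro arr N K _ hpre
  unfold Spec_printArrayAfterKOperations printArrayAfterKOperations printArrayAfterKOperations_alt
  by_cases hK : K = 0
  · simp [hK]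
  · obtain ⟨hne, hN⟩ : arr ≠ [] ∧ N ≤ arr.length := hpre.resolve_left hK
    simp only [hK, if_false]
    have hband : PySem.Int.band K 1 = PySem.Int.mod K 2 := PySem.Int.band_one K
    by_cases hodd : PySem.Int.mod K 2 ≠ 0
    · -- K odd: one step, max - x
      have hb : PySem.Int.band K 1 ≠ 0 := by rw [hband]; exact hodd
      simp only [if_pos hb, if_pos hodd, List.range_one, List.foldl_cons, List.foldl_nil]
      rw [foldl_append_map, List.nil_append, pvStep_eq, max?_of_ne_nil arr hne]
      apply List.map_congr_left
      intro i hi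
      rw [pyGet_map_in_range arr _ N i hi hN]
      rfl
    · -- K even (and ≠ 0): two steps, x - min
      have hb : ¬ PySem.Int.band K 1 ≠ 0 := by rw [hband]; exact hodd
      have hr2 : List.range 2 = [0, 1] := by decide
      simp only [if_neg hb, if_neg hodd, hr2, List.foldl_cons, List.foldl_nil]
      rw [foldl_append_map, List.nil_append]
      have h2 : pvStep (pvStep arr) = arr.map (fun x => x - pvMin arr) := pvStep_pvStep arr hne
      rw [h2, min?_of_ne_nil arr hne]
      apply List.map_congr_left
      intro i hi
      rw [pyGet_map_in_range arr _ N i hi hN]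
      rfl
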